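-- pv_equiv track=rewrite | github.com/Fasthei/Enhancing-Character-Mining-System-Based-on-Artificial-Intelligence | ExtractRelationshipsFunction/ExtractRelationships/__init__.py | near_names
-- ===== SOURCE A (Python) =====
-- def near_names(name1, name2, keyword, text, window_size=50):
--     """判断关键词是否出现在两个名字附近"""
--     if not text:
--         return False
--
--     for i in range(max(0, len(text) - window_size + 1)):
--         window = text[i:i + window_size]
--         if keyword in window and (name1 in window or name2 in window):
--             return True
--     return False
-- ===== SOURCE B (Python) =====
-- def near_names(name1, name2, keyword, text, window_size=50):
--     """判断关键词是否出现在两个名字附近"""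
--     if not text:
--         return False
--
--     def occurrences(s):
--         out = []
--         i = text.find(s)
--         while i != -1:
--             out.append(i)
--             i = text.find(s, i + 1)
--         return out
--
--     lk = len(keyword)
--     ks = occurrences(keyword)
--     names = [(p, len(name1)) for p in occurrences(name1)] + \
--             [(p, len(name2)) for p in occurrences(name2)]
--     return any(max(k + lk, p + ln) - min(k, p) <= window_size
--                for k in ks for (p, ln) in names)
-- ===== Notes on version B (the rewrite author's own statement) =====
-- stated objective: faster
-- what changed: replaces A's slide over every window position (slicing the window and substring-searching it three times) by one str.find scan per pattern that collects occurrence positions once, then a span check over keyword/name occurrence pairs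
-- intended difference: When window_size exceeds len(text), A's loop range is empty and it returns False even though the keyword and a name co-occur in the text; B returns True there, the intended value of 'keyword occurs near a name'. — e.g. on near_names("ab", "x", "c", "abc", 10): A returns false, B returns true
-- outside the precondition, e.g. on near_names('', 'x', '', 'ab', -1): A returns True, B returns False
import Mathlib
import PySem

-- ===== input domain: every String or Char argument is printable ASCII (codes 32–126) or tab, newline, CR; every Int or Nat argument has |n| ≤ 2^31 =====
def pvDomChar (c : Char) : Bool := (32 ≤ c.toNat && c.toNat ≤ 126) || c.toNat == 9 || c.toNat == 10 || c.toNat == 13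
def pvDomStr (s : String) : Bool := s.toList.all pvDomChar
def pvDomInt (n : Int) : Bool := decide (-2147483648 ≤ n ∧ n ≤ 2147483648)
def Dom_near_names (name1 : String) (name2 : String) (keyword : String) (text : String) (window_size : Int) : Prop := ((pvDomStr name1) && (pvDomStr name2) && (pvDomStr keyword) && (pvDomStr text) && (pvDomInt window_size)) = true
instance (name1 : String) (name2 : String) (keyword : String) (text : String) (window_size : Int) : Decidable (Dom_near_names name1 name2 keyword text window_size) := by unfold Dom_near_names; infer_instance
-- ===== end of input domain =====

-- B replaces A's O(n·w) sliding-window scan by collecting the occurrence positions of the three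
-- patterns once (str.find loops) and testing whether a keyword occurrence and a name occurrence
-- fit in one window; where the window is larger than the whole text A's range is empty and it
-- returns False even when keyword and a name co-occur — B returns True there (stated as D_).

-- ===== PORT A =====
def near_names (name1 : String) (name2 : String) (keyword : String) (text : String) (window_size : Int) : Bool :=
  if text = "" then false
  else
    (PySem.List.pyRange 0 (max 0 (PySem.Str.len text - window_size + 1)) 1).any (fun i =>
      let window := PySem.Str.slice text (some i) (some (i + window_size))
      PySem.Str.isIn keyword window && (PySem.Str.isIn name1 window || PySem.Str.isIn name2 window))

-- ===== PORT B =====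
-- the Python loop 'i = text.find(s); while i != -1: out.append(i); i = text.find(s, i+1)';
-- the fuel argument only makes the recursion structural (pvFindFrom_bounds below shows each
-- found index is ≥ start and ≤ len(t), so the fuel t.length + 1 - start never runs out)
def occFromGo (t s : List Char) : Nat → Nat → List Int
  | 0, _ => []
  | fuel + 1, start =>
    let i := PySem.Chars.findFrom t s (start : Int) none
    if i = -1 then []
    else i :: occFromGo t s fuel (i.toNat + 1)

def occFrom (t s : List Char) (start : Nat) : List Int :=
  occFromGo t s (t.length + 1 - start) start

def near_names_alt (name1 : String) (name2 : String) (keyword : String) (text : String) (window_size : Int) : Bool :=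
  if text = "" then false
  else
    let t := text.toList
    let lk : Int := (keyword.toList.length : Int)
    let ks := occFrom t keyword.toList 0
    let names :=
      (occFrom t name1.toList 0).map (fun p => (p, (name1.toList.length : Int))) ++
      (occFrom t name2.toList 0).map (fun p => (p, (name2.toList.length : Int)))
    ks.any (fun k => names.any (fun pl => decide (max (k + lk) (pl.1 + pl.2) - min k pl.1 ≤ window_size)))

-- ===== PRECONDITION & SPEC =====
-- Pre_ excludes negative window sizes: a window length below 0 is outside the function's
-- natural domain (A still returns there, sliding over empty windows, and can answer True
-- for empty patterns; B's position arithmetic answers False).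
def Pre_near_names (name1 : String) (name2 : String) (keyword : String) (text : String) (window_size : Int) : Prop :=
  0 ≤ window_size
instance (name1 : String) (name2 : String) (keyword : String) (text : String) (window_size : Int) : Decidable (Pre_near_names name1 name2 keyword text window_size) := by unfold Pre_near_names; infer_instance

def pvWitness_near_names : String × String × String × String × Int := ("Tom", "Amy", "love", "Tom love Amy", 8)

-- When the window is larger than the whole text, A's range is empty and it returns False even
-- though the keyword and a name co-occur in the text; B returns True there, the intended value.
def D_near_names (name1 : String) (name2 : String) (keyword : String) (text : String) (window_size : Int) : Prop :=
  text ≠ "" ∧ PySem.Str.len text < window_size ∧ PySem.Str.isIn keyword text = true ∧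
    (PySem.Str.isIn name1 text = true ∨ PySem.Str.isIn name2 text = true)
instance (name1 : String) (name2 : String) (keyword : String) (text : String) (window_size : Int) : Decidable (D_near_names name1 name2 keyword text window_size) := by unfold D_near_names; infer_instance

def Spec_near_names (name1 : String) (name2 : String) (keyword : String) (text : String) (window_size : Int) (out : Bool) : Prop := ¬ D_near_names name1 name2 keyword text window_size → out = near_names_alt name1 name2 keyword text window_size
instance (name1 : String) (name2 : String) (keyword : String) (text : String) (window_size : Int) (out : Bool) : Decidable (Spec_near_names name1 name2 keyword text window_size out) := by unfold Spec_near_names; infer_instance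

def pvDiffWitness_near_names : String × String × String × String × Int := ("ab", "x", "c", "abc", 10)
def pvDiffWitnessOut_near_names : Bool × Bool := (false, true)

-- ===== CLAIM (what is proved, stated in full; the proofs are below) =====
def Claim_unchanged_near_names : Prop := ∀ (name1 : String) (name2 : String) (keyword : String) (text : String) (window_size : Int), Dom_near_names name1 name2 keyword text window_size → Pre_near_names name1 name2 keyword text window_size → Spec_near_names name1 name2 keyword text window_size (near_names name1 name2 keyword text window_size)
def Claim_changed_near_names : Prop := Dom_near_names (pvDiffWitness_near_names.1) (pvDiffWitness_near_names.2.1) (pvDiffWitness_near_names.2.2.1) (pvDiffWitness_near_names.2.2.2.1) (pvDiffWitness_near_names.2.2.2.2) ∧ Pre_near_names (pvDiffWitness_near_names.1) (pvDiffWitness_near_names.2.1) (pvDiffWitness_near_names.2.2.1) (pvDiffWitness_near_names.2.2.2.1) (pvDiffWitness_near_names.2.2.2.2) ∧ D_near_names (pvDiffWitness_near_names.1) (pvDiffWitness_near_names.2.1) (pvDiffWitness_near_names.2.2.1) (pvDiffWitness_near_names.2.2.2.1) (pvDiffWitness_near_names.2.2.2.2) ∧ near_names (pvDiffWitness_near_names.1)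 (pvDiffWitness_near_names.2.1) (pvDiffWitness_near_names.2.2.1) (pvDiffWitness_near_names.2.2.2.1) (pvDiffWitness_near_names.2.2.2.2) = pvDiffWitnessOut_near_names.1 ∧ near_names_alt (pvDiffWitness_near_names.1) (pvDiffWitness_near_names.2.1) (pvDiffWitness_near_names.2.2.1) (pvDiffWitness_near_names.2.2.2.1) (pvDiffWitness_near_names.2.2.2.2) = pvDiffWitnessOut_near_names.2 ∧ pvDiffWitnessOut_near_names.1 ≠ pvDiffWitnessOut_near_names.2
def Claim_exact_near_names : Prop := ∀ (name1 : String) (name2 : String) (keyword : String) (text : String) (window_size : Int), Dom_near_names name1 name2 keyword text window_size → Pre_near_names name1 name2 keyword text window_size → D_near_names name1 name2 keyword text window_size → near_names name1 name2 keyword text window_size ≠ near_names_alt name1 name2 keyword text window_size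

-- ===== LEMMAS AND PROOFS =====

theorem pvFindFrom_bounds (t s : List Char) (start : Nat)
    (h : PySem.Chars.findFrom t s (start : Int) none ≠ -1) :
    start ≤ (PySem.Chars.findFrom t s (start : Int) none).toNat ∧
    (PySem.Chars.findFrom t s (start : Int) none).toNat ≤ t.length ∧ start ≤ t.length := by
  by_cases hs : start ≤ t.length
  · rw [PySem.Chars.findFrom_natCast t s start hs] at h ⊢
    have h1 := PySem.Chars.neg_one_le_find (t.drop start) s
    have h2 := PySem.Chars.find_le_length (t.drop start) s
    simp only [List.length_drop] at h2
    split at h <;> split <;> omega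
  · exfalso
    apply h
    simp only [PySem.Chars.findFrom]
    have : ¬ ((start : Int) < 0) := by omega
    rw [if_neg this, if_pos (by omega)]

theorem prefix_drop_infix (t s : List Char) (a p : Nat) (hap : a ≤ p) (h : s <+: t.drop p) :
    s <:+: t.drop a := by
  have hd : (t.drop a).drop (p - a) = t.drop p := by
    rw [List.drop_drop]; congr 1; omega
  exact (hd ▸ h.isInfix : s <:+: (t.drop a).drop (p - a)).trans (List.drop_suffix _ _).isInfix

theorem mem_occFromGo (t s : List Char) (fuel : Nat) : ∀ (start : Nat) (x : Int),
    t.length + 1 ≤ fuel + start →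
    (x ∈ occFromGo t s fuel start ↔
      ∃ p : Nat, x = (p : Int) ∧ start ≤ p ∧ p ≤ t.length ∧ s <+: t.drop p) := by
  induction fuel with
  | zero =>
    intro start x hsuf
    simp only [occFromGo, List.not_mem_nil, false_iff]
    rintro ⟨p, _, h2, h3, _⟩; omega
  | succ fuel ih =>
    intro start x hsuf
    simp only [occFromGo]
    by_cases hi : PySem.Chars.findFrom t s (start : Int) none = -1
    · rw [if_pos hi]
      simp only [List.not_mem_nil, false_iff]
      rintro ⟨p, _, h2, h3, h4⟩
      have hs : start ≤ t.length := le_trans h2 h3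
      exact ((PySem.Chars.findFrom_natCast_eq_neg_one_iff t s start hs).mp hi)
        (prefix_drop_infix t s start p h2 h4)
    · rw [if_neg hi]
      obtain ⟨hb1, hb2, hb3⟩ := pvFindFrom_bounds t s start hi
      -- characterize i
      have hnc := PySem.Chars.findFrom_natCast t s start hb3
      set i := PySem.Chars.findFrom t s (start : Int) none with hidef
      set r := PySem.Chars.find (t.drop start) s with hrdef
      have hr : r ≠ -1 := by intro h0; rw [hnc, if_pos h0] at hi; exact hi rfl
      have hival : i = (start : Int) + r := by rw [hnc, if_neg hr]
      have hr0 : 0 ≤ r := by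
        have := PySem.Chars.neg_one_le_find (t.drop start) s; rw [← hrdef] at this; omega
      have hfs := PySem.Chars.find_spec (s := t.drop start) (sub := s) (by rw [← hrdef]; exact hr0)
      rw [← hrdef] at hfs
      have hitoNat : i.toNat = start + r.toNat := by omega
      have hpref : s <+: t.drop i.toNat := by
        rw [hitoNat, ← List.drop_drop]
        exact hfs.1
      have hmin : ∀ p : Nat, start ≤ p → p < i.toNat → ¬ s <+: t.drop p := by
        intro p hp1 hp2 hp
        apply hfs.2 (p - start) (by omega)
        rw [List.drop_drop]
        have : start + (p - start) = p := by omega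
        rw [this]; exact hp
      rw [List.mem_cons, ih (i.toNat + 1) x (by omega)]
      constructor
      · rintro (rfl | ⟨p, rfl, hp1, hp2, hp3⟩)
        · exact ⟨i.toNat, by omega, hb1, hb2, hpref⟩
        · exact ⟨p, rfl, by omega, hp2, hp3⟩
      · rintro ⟨p, rfl, hp1, hp2, hp3⟩
        rcases lt_trichotomy p i.toNat with h | h | h
        · exact absurd hp3 (hmin p hp1 h)
        · left; omega
        · right; exact ⟨p, rfl, by omega, hp2, hp3⟩

theorem mem_occFrom (t s : List Char) (start : Nat) (x : Int) :
    x ∈ occFrom t s start ↔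
      ∃ p : Nat, x = (p : Int) ∧ start ≤ p ∧ p ≤ t.length ∧ s <+: t.drop p := by
  exact mem_occFromGo t s _ start x (by omega)

theorem occ_add_length_le {t s : List Char} {p : Nat} (h : s <+: t.drop p) (hp : p ≤ t.length) :
    p + s.length ≤ t.length := by
  have := h.length_le
  simp only [List.length_drop] at this
  omega

-- the window slice of A, as drop/take

theorem isIn_take_drop_iff (t sub : List Char) (i w : Nat) (hiw : i + w ≤ t.length) :
    PySem.Chars.isIn sub ((t.drop i).take w) = true ↔
      ∃ p : Nat, i ≤ p ∧ p ≤ t.length ∧ p + sub.length ≤ i + w ∧ sub <+: t.drop p := by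
  rw [← PySem.Chars.exists_prefix_drop_iff_isIn]
  constructor
  · rintro ⟨j, hj⟩
    rcases eq_or_ne sub [] with rfl | hne
    · exact ⟨i, le_refl _, by omega, by simp, List.nil_prefix⟩
    · rw [List.drop_take, List.drop_drop] at hj
      have := List.prefix_take_iff.mp hj
      have hlen : sub.length ≤ w - j := this.2
      have hpos : 0 < sub.length := List.length_pos_of_ne_nil hne
      have hjw : j < w := by omega
      exact ⟨i + j, by omega, by omega, by omega, this.1⟩
  · rintro ⟨p, hp1, hp2, hp3, hp4⟩
    refine ⟨p - i, ?_⟩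
    rw [List.drop_take, List.drop_drop]
    rw [List.prefix_take_iff]
    constructor
    · have : i + (p - i) = p := by omega
      rw [this]; exact hp4
    · omega

theorem window_toList (text : String) (x ws : Int) (hx : 0 ≤ x) (hw : 0 ≤ ws) :
    (PySem.Str.slice text (some x) (some (x + ws))).toList =
      (text.toList.drop x.toNat).take ws.toNat := by
  rw [PySem.Str.toList_slice, PySem.Chars.slice_eq_listSlice,
    PySem.List.slice_toNat _ hx (by omega)]
  congr 1
  omega

-- characterization of A as "some fitting window contains the keyword and a name"

theorem A_char (name1 name2 keyword text : String) (ws : Int) (hw : 0 ≤ ws) (ht : text ≠ "") :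
    near_names name1 name2 keyword text ws = true ↔
      ∃ i : Nat, (i : Int) + ws ≤ text.toList.length ∧
        PySem.Chars.isIn keyword.toList ((text.toList.drop i).take ws.toNat) = true ∧
        (PySem.Chars.isIn name1.toList ((text.toList.drop i).take ws.toNat) = true ∨
         PySem.Chars.isIn name2.toList ((text.toList.drop i).take ws.toNat) = true) := by
  simp only [near_names, if_neg ht, List.any_eq_true, PySem.Str.isIn_eq,
    Bool.and_eq_true, Bool.or_eq_true, PySem.Str.len_eq]
  constructor
  · rintro ⟨x, hx, hbody⟩
    rw [PySem.List.mem_pyRange_iff_of_pos one_pos] at hx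
    obtain ⟨hx0, hxb, -⟩ := hx
    rw [window_toList text x ws hx0 hw] at hbody
    exact ⟨x.toNat, by omega, hbody⟩
  · rintro ⟨i, hi, hbody⟩
    refine ⟨(i : Int), ?_, ?_⟩
    · rw [PySem.List.mem_pyRange_iff_of_pos one_pos]
      refine ⟨by omega, by omega, by omega⟩
    · rw [window_toList text i ws (by omega) hw]
      have : ((i : Int).toNat) = i := by omega
      rw [this]
      exact hbody

-- characterization of B as "a keyword occurrence and a name occurrence span at most ws"

theorem B_char (name1 name2 keyword text : String) (ws : Int) (ht : text ≠ "") :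
    near_names_alt name1 name2 keyword text ws = true ↔
      ∃ pk : Nat, pk ≤ text.toList.length ∧ keyword.toList <+: text.toList.drop pk ∧
        ∃ pn ln : Nat,
          ((pn ≤ text.toList.length ∧ name1.toList <+: text.toList.drop pn ∧ ln = name1.toList.length) ∨
           (pn ≤ text.toList.length ∧ name2.toList <+: text.toList.drop pn ∧ ln = name2.toList.length)) ∧
          max ((pk : Int) + keyword.toList.length) ((pn : Int) + ln) - min (pk : Int) (pn : Int) ≤ ws := by
  simp only [near_names_alt, if_neg ht, List.any_eq_true, List.mem_append, List.mem_map,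
    decide_eq_true_eq, mem_occFrom]
  constructor
  · rintro ⟨x, ⟨pk, rfl, -, hpk, hkpref⟩, pl, hpl, hspan⟩
    rcases hpl with ⟨y, ⟨pn, rfl, -, hpn, hnpref⟩, rfl⟩ | ⟨y, ⟨pn, rfl, -, hpn, hnpref⟩, rfl⟩
    · exact ⟨pk, hpk, hkpref, pn, name1.toList.length, Or.inl ⟨hpn, hnpref, rfl⟩, hspan⟩
    · exact ⟨pk, hpk, hkpref, pn, name2.toList.length, Or.inr ⟨hpn, hnpref, rfl⟩, hspan⟩
  · rintro ⟨pk, hpk, hkpref, pn, ln, hname, hspan⟩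
    rcases hname with ⟨hpn, hnpref, rfl⟩ | ⟨hpn, hnpref, rfl⟩
    · exact ⟨(pk : Int), ⟨pk, rfl, by omega, hpk, hkpref⟩,
        ((pn : Int), (name1.toList.length : Int)),
        Or.inl ⟨(pn : Int), ⟨pn, rfl, by omega, hpn, hnpref⟩, rfl⟩, by simpa using hspan⟩
    · exact ⟨(pk : Int), ⟨pk, rfl, by omega, hpk, hkpref⟩,
        ((pn : Int), (name2.toList.length : Int)),
        Or.inr ⟨(pn : Int), ⟨pn, rfl, by omega, hpn, hnpref⟩, rfl⟩, by simpa using hspan⟩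

theorem near_names_eq_alt (name1 name2 keyword text : String) (window_size : Int)
    (hw : 0 ≤ window_size) (hD : ¬ D_near_names name1 name2 keyword text window_size) :
    near_names name1 name2 keyword text window_size = near_names_alt name1 name2 keyword text window_size := by
  by_cases ht : text = ""
  · simp [near_names, near_names_alt, ht]
  · rw [Bool.eq_iff_iff, A_char name1 name2 keyword text window_size hw ht,
      B_char name1 name2 keyword text window_size ht]
    by_cases hL : (text.toList.length : Int) < window_size
    · -- window larger than text: both sides false
      have hA : ¬ ∃ i : Nat, (i : Int) + window_size ≤ text.toList.length ∧
          PySem.Chars.isIn keyword.toList ((text.toList.drop i).take window_size.toNat) = true ∧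
          (PySem.Chars.isIn name1.toList ((text.toList.drop i).take window_size.toNat) = true ∨
           PySem.Chars.isIn name2.toList ((text.toList.drop i).take window_size.toNat) = true) := by
        rintro ⟨i, hi, -⟩; omega
      have hB : ¬ ∃ pk : Nat, pk ≤ text.toList.length ∧ keyword.toList <+: text.toList.drop pk ∧
          ∃ pn ln : Nat,
            ((pn ≤ text.toList.length ∧ name1.toList <+: text.toList.drop pn ∧ ln = name1.toList.length) ∨
             (pn ≤ text.toList.length ∧ name2.toList <+: text.toList.drop pn ∧ ln = name2.toList.length)) ∧
            max ((pk : Int) + keyword.toList.length) ((pn : Int) + ln) - min (pk : Int) (pn : Int) ≤ window_size := by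
        rintro ⟨pk, hpk, hkpref, pn, ln, hname, -⟩
        apply hD
        refine ⟨ht, by rw [PySem.Str.len_eq]; exact hL, ?_, ?_⟩
        · rw [PySem.Str.isIn_iff_infix]
          have := prefix_drop_infix text.toList keyword.toList 0 pk (by omega) hkpref
          simpa using this
        · rcases hname with ⟨hpn, hnpref, -⟩ | ⟨hpn, hnpref, -⟩
          · left; rw [PySem.Str.isIn_iff_infix]
            have := prefix_drop_infix text.toList name1.toList 0 pn (by omega) hnpref
            simpa using this
          · right; rw [PySem.Str.isIn_iff_infix]
            have := prefix_drop_infix text.toList name2.toList 0 pn (by omega) hnpref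
            simpa using this
      exact iff_of_false hA hB
    · -- the window fits: both sides say "a keyword and a name occurrence within distance ws"
      rw [not_lt] at hL
      constructor
      · rintro ⟨i, hi, hk, hn⟩
        have hiw : i + window_size.toNat ≤ text.toList.length := by omega
        obtain ⟨pk, hk1, hk2, hk3, hk4⟩ := (isIn_take_drop_iff _ _ _ _ hiw).mp hk
        rcases hn with hn | hn
        · obtain ⟨pn, hn1, hn2, hn3, hn4⟩ := (isIn_take_drop_iff _ _ _ _ hiw).mp hn
          exact ⟨pk, hk2, hk4, pn, name1.toList.length, Or.inl ⟨hn2, hn4, rfl⟩, by omega⟩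
        · obtain ⟨pn, hn1, hn2, hn3, hn4⟩ := (isIn_take_drop_iff _ _ _ _ hiw).mp hn
          exact ⟨pk, hk2, hk4, pn, name2.toList.length, Or.inr ⟨hn2, hn4, rfl⟩, by omega⟩
      · rintro ⟨pk, hpk, hkpref, pn, ln, hname, hspan⟩
        have hkle := occ_add_length_le hkpref hpk
        have hnle : pn + ln ≤ text.toList.length := by
          rcases hname with ⟨hpn, hnpref, rfl⟩ | ⟨hpn, hnpref, rfl⟩ <;>
            exact occ_add_length_le hnpref hpn
        refine ⟨min (min pk pn) (text.toList.length - window_size.toNat), by omega, ?_, ?_⟩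
        · exact (isIn_take_drop_iff _ _ _ _ (by omega)).mpr ⟨pk, by omega, hpk, by omega, hkpref⟩
        · rcases hname with ⟨hpn, hnpref, rfl⟩ | ⟨hpn, hnpref, rfl⟩
          · exact Or.inl ((isIn_take_drop_iff _ _ _ _ (by omega)).mpr ⟨pn, by omega, hpn, by omega, hnpref⟩)
          · exact Or.inr ((isIn_take_drop_iff _ _ _ _ (by omega)).mpr ⟨pn, by omega, hpn, by omega, hnpref⟩)

theorem infix_occ (t s : List Char) (h : s <:+: t) :
    ∃ p : Nat, p ≤ t.length ∧ p + s.length ≤ t.length ∧ s <+: t.drop p := by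
  obtain ⟨u, v, huv⟩ := h
  have hlen := congrArg List.length huv
  simp only [List.length_append] at hlen
  refine ⟨u.length, by omega, by omega, ?_⟩
  rw [← huv, List.append_assoc, List.drop_left]
  exact ⟨v, rfl⟩

theorem near_names_ne_alt_of_D (name1 name2 keyword text : String) (window_size : Int)
    (hw : 0 ≤ window_size) (hD : D_near_names name1 name2 keyword text window_size) :
    near_names name1 name2 keyword text window_size = false ∧
    near_names_alt name1 name2 keyword text window_size = true := by
  obtain ⟨ht, hL, hk, hn⟩ := hD
  rw [PySem.Str.len_eq] at hL
  constructor
  · rw [Bool.eq_false_iff]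
    rw [Ne, A_char name1 name2 keyword text window_size hw ht]
    rintro ⟨i, hi, -⟩
    omega
  · rw [B_char name1 name2 keyword text window_size ht]
    obtain ⟨pk, hpk1, hpk2, hpk3⟩ :=
      infix_occ text.toList keyword.toList ((PySem.Str.isIn_iff_infix _ _).mp hk)
    rcases hn with hn | hn
    · obtain ⟨pn, hpn1, hpn2, hpn3⟩ :=
        infix_occ text.toList name1.toList ((PySem.Str.isIn_iff_infix _ _).mp hn)
      exact ⟨pk, hpk1, hpk3, pn, name1.toList.length, Or.inl ⟨hpn1, hpn3, rfl⟩, by omega⟩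
    · obtain ⟨pn, hpn1, hpn2, hpn3⟩ :=
        infix_occ text.toList name2.toList ((PySem.Str.isIn_iff_infix _ _).mp hn)
      exact ⟨pk, hpk1, hpk3, pn, name2.toList.length, Or.inr ⟨hpn1, hpn3, rfl⟩, by omega⟩

-- ===== VERDICT (by name: the statement is the Claim_ definition above) =====
theorem near_names_spec : Claim_unchanged_near_names := by
  intro name1 name2 keyword text window_size _ hPre
  unfold Spec_near_names
  intro hD
  exact near_names_eq_alt name1 name2 keyword text window_size hPre hD

theorem near_names_changed : Claim_changed_near_names := by
  unfold Claim_changed_near_names; decide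

theorem near_names_tight : Claim_exact_near_names := by
  intro name1 name2 keyword text window_size _ hPre hD
  obtain ⟨hA, hB⟩ := near_names_ne_alt_of_D name1 name2 keyword text window_size hPre hD
  rw [hA, hB]
  exact Bool.false_ne_true
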